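-- pv_equiv track=rewrite | github.com/raeez/chiral-bar-cobar | compute/lib/ds_spectral_branch_sl3.py | ce_poincare_polynomial_sl_n
-- ===== SOURCE A (Python) =====
-- from typing import Dict, List, Optional, Tuple
--
-- def ce_poincare_polynomial_sl_n(n: int) -> List[int]:
--     """Poincare polynomial of H*(sl_n, C).
--
--     H*(sl_n) = Λ(x_3, x_5, ..., x_{2n-1}) where |x_{2i+1}| = 2i+1.
--     Generators in degrees 3, 5, ..., 2n-1.
--     """
--     degrees = [2 * i + 1 for i in range(1, n)]
--     # Poincare polynomial: product of (1 + t^d) for d in degrees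
--     max_degree = sum(degrees)
--     poly = [0] * (max_degree + 1)
--     poly[0] = 1
--     for d in degrees:
--         new_poly = list(poly)
--         for k in range(max_degree + 1):
--             if poly[k] != 0 and k + d <= max_degree:
--                 new_poly[k + d] += poly[k]
--         poly = new_poly
--     return poly
-- ===== SOURCE B (Python) =====
-- from typing import List
--
--
-- def ce_poincare_polynomial_sl_n(n: int) -> List[int]:
--     """Pack the coefficients into carry-free bit slots of one big integer,
--     multiply the binomial factors with a balanced product tree, and decode
--     the coefficient list by byte slicing."""
--     degrees = [2 * i + 1 for i in range(1, n)]
--     max_degree = sum(degrees)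
--     nbytes = (max(n, 1) + 7) // 8   # bytes per coefficient slot
--     b = 8 * nbytes                  # slot width in bits; every coefficient < 2**b
--     vals = [(1 << (b * d)) + 1 for d in degrees] or [1]
--     while len(vals) > 1:
--         vals = [vals[i] * vals[i + 1] for i in range(0, len(vals) - 1, 2)] + (
--             [vals[-1]] if len(vals) % 2 else [])
--     raw = vals[0].to_bytes(nbytes * (max_degree + 1), "little")
--     return [int.from_bytes(raw[k * nbytes:(k + 1) * nbytes], "little")
--             for k in range(max_degree + 1)]
-- ===== Notes on version B (the rewrite author's own statement) =====
-- stated objective: alternative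
-- what changed: A runs a dense subset-sum DP, rescanning the whole coefficient array once per generator; B packs the coefficients into carry-free fixed-width bit slots of a single big integer, multiplies the binomial factors with a balanced pairwise product tree, and decodes the coefficient list by slicing the integer's little-endian bytes.
import Mathlib
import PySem

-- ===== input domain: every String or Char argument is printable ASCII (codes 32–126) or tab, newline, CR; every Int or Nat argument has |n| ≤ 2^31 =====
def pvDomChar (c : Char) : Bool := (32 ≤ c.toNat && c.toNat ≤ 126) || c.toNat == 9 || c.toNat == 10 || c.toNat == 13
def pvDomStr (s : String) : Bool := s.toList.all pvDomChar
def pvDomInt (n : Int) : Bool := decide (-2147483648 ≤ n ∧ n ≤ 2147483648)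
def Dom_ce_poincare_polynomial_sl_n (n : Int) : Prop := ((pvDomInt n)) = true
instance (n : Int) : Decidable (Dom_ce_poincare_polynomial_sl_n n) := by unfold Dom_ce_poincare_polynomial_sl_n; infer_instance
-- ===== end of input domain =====

-- B replaces A's per-generator DP rescans by a balanced pairwise product tree over big
-- integers holding the coefficients in carry-free fixed-width bit slots (alternative,
-- not measured faster).

-- ===== PORT A =====
-- one pass of A's inner loop: for k in range(max_degree+1): if poly[k] != 0 and k+d <= max_degree: new_poly[k+d] += poly[k]
def pvStepA (maxD : Int) (poly : List Int) (d : Int) : List Int :=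
  (List.range (maxD + 1).toNat).foldl
    (fun np k =>
      if poly.getD k 0 ≠ 0 ∧ (k : Int) + d ≤ maxD then
        np.set (k + d.toNat) (np.getD (k + d.toNat) 0 + poly.getD k 0)
      else np)
    poly

def ce_poincare_polynomial_sl_n (n : Int) : List Int :=
  let degrees : List Int := (PySem.List.pyRange 1 n 1).map (fun i => 2 * i + 1)
  let maxD : Int := degrees.sum
  let poly0 : List Int := (List.replicate (maxD + 1).toNat 0).set 0 1
  degrees.foldl (pvStepA maxD) poly0

-- ===== PORT B =====
-- one level of the product tree: vals[0]*vals[1], vals[2]*vals[3], …, odd leftover kept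
def pvPairUp : List Nat → List Nat
  | a :: b :: rest => (a * b) :: pvPairUp rest
  | l => l

theorem pvPairUp_length_le : ∀ l : List Nat, (pvPairUp l).length ≤ l.length := by
  intro l
  induction l using pvPairUp.induct with
  | case1 a b rest ih => simp only [pvPairUp, List.length_cons]; omega
  | case2 l h => rw [pvPairUp.eq_def]; split <;> simp_all

theorem pvPairUp_length_lt (l : List Nat) (h : 2 ≤ l.length) : (pvPairUp l).length < l.length := by
  match l, h with
  | a :: b :: rest, _ =>
    have := pvPairUp_length_le rest
    simp only [pvPairUp, List.length_cons]
    omega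

-- python's  while len(vals) > 1: vals = [pairs] ;  return vals[0]
def pvReduce (l : List Nat) : Nat :=
  if h : l.length ≤ 1 then l.getD 0 1
  else pvReduce (pvPairUp l)
termination_by l.length
decreasing_by
  exact pvPairUp_length_lt l (by omega)

def ce_poincare_polynomial_sl_n_alt (n : Int) : List Int :=
  let degrees : List Int := (PySem.List.pyRange 1 n 1).map (fun i => 2 * i + 1)
  let maxD : Int := degrees.sum
  let nb : Int := PySem.Int.floordiv (max n 1 + 7) 8      -- bytes per coefficient slot
  let bits : Int := 8 * nb                                 -- slot width in bits
  let factors : List Nat := degrees.map (fun d => 2 ^ (bits * d).toNat + 1)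
  let vals : List Nat := if factors = [] then [1] else factors
  let P : Nat := pvReduce vals
  -- P.to_bytes(nb*(maxD+1), 'little'): the little-endian base-256 digits of P
  let raw : List Nat := (List.range (nb * (maxD + 1)).toNat).map (fun i => P / 256 ^ i % 256)
  -- int.from_bytes(raw[k*nb:(k+1)*nb], 'little') for each slot k
  (List.range (maxD + 1).toNat).map (fun k =>
    (((List.range nb.toNat).map (fun j => raw.getD (k * nb.toNat + j) 0 * 256 ^ j)).sum : Int))

-- ===== PRECONDITION & SPEC =====
def Spec_ce_poincare_polynomial_sl_n (n : Int) (out : List Int) : Prop := out = ce_poincare_polynomial_sl_n_alt n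
instance (n : Int) (out : List Int) : Decidable (Spec_ce_poincare_polynomial_sl_n n out) := by unfold Spec_ce_poincare_polynomial_sl_n; infer_instance

-- ===== CLAIM (what is proved, stated in full; the proofs are below) =====
def Claim_equal_ce_poincare_polynomial_sl_n : Prop := ∀ (n : Int), Dom_ce_poincare_polynomial_sl_n n → Spec_ce_poincare_polynomial_sl_n n (ce_poincare_polynomial_sl_n n)

-- ===== LEMMAS AND PROOFS =====

-- view a coefficient list as a polynomial over ℤ
noncomputable def pvP (p : List Int) : Polynomial ℤ :=
  ∑ i ∈ Finset.range p.length, Polynomial.C (p.getD i 0) * Polynomial.X ^ i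

theorem pvP_coeff (p : List Int) (k : ℕ) : (pvP p).coeff k = p.getD k 0 := by
  unfold pvP
  rw [Polynomial.finset_sum_coeff]
  simp only [Polynomial.coeff_C_mul, Polynomial.coeff_X_pow, mul_ite, mul_one, mul_zero]
  rw [Finset.sum_ite_eq (Finset.range p.length) k (fun i => p.getD i 0)]
  by_cases hk : k < p.length
  · simp [hk]
  · have hk' : p.length ≤ k := by omega
    rw [List.getD_eq_default _ _ hk']
    simp [Finset.mem_range, hk]

-- coefficient of p * (1 + X^e)
theorem pvCoeff_mul_binom (p : Polynomial ℤ) (e k : ℕ) :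
    (p * (1 + Polynomial.X ^ e)).coeff k
      = p.coeff k + (if e ≤ k then p.coeff (k - e) else 0) := by
  rw [mul_add, mul_one, Polynomial.coeff_add, Polynomial.coeff_mul_X_pow']

-- A-side: characterization of A's inner loop after processing k = 0, 1, …, m-1
theorem pvStepA_foldl (maxD : Int) (poly : List Int) (d : Int) (hd : 0 < d)
    (hlen : poly.length = (maxD + 1).toNat) :
    ∀ m : ℕ, m ≤ (maxD + 1).toNat →
      ((List.range m).foldl
        (fun np k =>
          if poly.getD k 0 ≠ 0 ∧ (k : Int) + d ≤ maxD then
            np.set (k + d.toNat) (np.getD (k + d.toNat) 0 + poly.getD k 0)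
          else np) poly).length = poly.length ∧
      ∀ j : ℕ, ((List.range m).foldl
        (fun np k =>
          if poly.getD k 0 ≠ 0 ∧ (k : Int) + d ≤ maxD then
            np.set (k + d.toNat) (np.getD (k + d.toNat) 0 + poly.getD k 0)
          else np) poly).getD j 0
        = poly.getD j 0 +
          (if d.toNat ≤ j ∧ j < d.toNat + m ∧ (j : Int) ≤ maxD then poly.getD (j - d.toNat) 0 else 0) := by
  intro m
  induction m with
  | zero =>
    intro _
    refine ⟨rfl, fun j => ?_⟩
    simp only [List.range_zero, List.foldl_nil]
    rw [if_neg (by omega)]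
    ring
  | succ m ih =>
    intro hm
    obtain ⟨ihlen, ihget⟩ := ih (by omega)
    rw [List.range_succ, List.foldl_append, List.foldl_cons, List.foldl_nil]
    set np := (List.range m).foldl
        (fun np k =>
          if poly.getD k 0 ≠ 0 ∧ (k : Int) + d ≤ maxD then
            np.set (k + d.toNat) (np.getD (k + d.toNat) 0 + poly.getD k 0)
          else np) poly with hnp
    by_cases hg : poly.getD m 0 ≠ 0 ∧ (m : Int) + d ≤ maxD
    · rw [if_pos hg]
      constructor
      · rw [List.length_set]; exact ihlen
      · intro j
        have hidx : m + d.toNat < np.length := by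
          rw [ihlen, hlen]; omega
        by_cases hj : j = m + d.toNat
        · subst hj
          rw [List.getD_eq_getElem?_getD, List.getElem?_set, if_pos rfl, if_pos hidx]
          simp only [Option.getD_some]
          rw [ihget]
          have hc1 : ¬ (d.toNat ≤ m + d.toNat ∧ m + d.toNat < d.toNat + m ∧ ((m + d.toNat : ℕ) : Int) ≤ maxD) := by omega
          have hc2 : d.toNat ≤ m + d.toNat ∧ m + d.toNat < d.toNat + (m + 1) ∧ ((m + d.toNat : ℕ) : Int) ≤ maxD := by
            refine ⟨by omega, by omega, ?_⟩
            push_cast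
            omega
          rw [if_neg hc1, if_pos hc2]
          have : m + d.toNat - d.toNat = m := by omega
          rw [this]
          ring
        · rw [List.getD_eq_getElem?_getD, List.getElem?_set, if_neg (fun h => hj h.symm),
            ← List.getD_eq_getElem?_getD, ihget]
          congr 1
          apply if_congr _ rfl rfl
          constructor
          · rintro ⟨h1, h2, h3⟩; exact ⟨h1, by omega, h3⟩
          · rintro ⟨h1, h2, h3⟩
            refine ⟨h1, ?_, h3⟩
            rcases Nat.lt_succ_iff_lt_or_eq.mp (by omega : j - d.toNat < m + 1) with h | h
            · omega
            · exfalso; exact hj (by omega)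
    · rw [if_neg hg]
      refine ⟨ihlen, fun j => ?_⟩
      rw [ihget]
      rcases not_and_or.mp hg with h0 | hle
      · -- poly[m] = 0 : the extra possible write adds 0
        rw [not_not] at h0
        by_cases hj : j = m + d.toNat
        · subst hj
          have hm' : m + d.toNat - d.toNat = m := by omega
          by_cases hc : (m + d.toNat : Int) ≤ maxD
          · have c1 : ¬ (d.toNat ≤ m + d.toNat ∧ m + d.toNat < d.toNat + m ∧ ((m + d.toNat : ℕ) : Int) ≤ maxD) := by omega
            have c2 : d.toNat ≤ m + d.toNat ∧ m + d.toNat < d.toNat + (m + 1) ∧ ((m + d.toNat : ℕ) : Int) ≤ maxD := by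
              refine ⟨by omega, by omega, by push_cast; omega⟩
            rw [if_neg c1, if_pos c2, hm', h0]
          · have c1 : ¬ (d.toNat ≤ m + d.toNat ∧ m + d.toNat < d.toNat + m ∧ ((m + d.toNat : ℕ) : Int) ≤ maxD) := by
              rintro ⟨_, _, h⟩; apply hc; push_cast at h ⊢; omega
            have c2 : ¬ (d.toNat ≤ m + d.toNat ∧ m + d.toNat < d.toNat + (m + 1) ∧ ((m + d.toNat : ℕ) : Int) ≤ maxD) := by
              rintro ⟨_, _, h⟩; apply hc; push_cast at h ⊢; omega
            rw [if_neg c1, if_neg c2]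
        · congr 1
          apply if_congr _ rfl rfl
          constructor
          · rintro ⟨h1, h2, h3⟩; exact ⟨h1, by omega, h3⟩
          · rintro ⟨h1, h2, h3⟩
            refine ⟨h1, ?_, h3⟩
            rcases Nat.lt_succ_iff_lt_or_eq.mp (by omega : j - d.toNat < m + 1) with h | h
            · omega
            · exfalso; exact hj (by omega)
      · -- m + d > maxD : no write happens, and the condition stays false at j = m + d
        rw [not_le] at hle
        congr 1
        apply if_congr _ rfl rfl
        constructor
        · rintro ⟨h1, h2, h3⟩; exact ⟨h1, by omega, h3⟩
        · rintro ⟨h1, h2, h3⟩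
          refine ⟨h1, ?_, h3⟩
          rcases Nat.lt_succ_iff_lt_or_eq.mp (by omega : j - d.toNat < m + 1) with h | h
          · omega
          · exfalso
            have hj' : j = m + d.toNat := by omega
            subst hj'
            push_cast at h3
            omega

theorem pvStepA_length (maxD : Int) (poly : List Int) (d : Int) (hd : 0 < d)
    (hlen : poly.length = (maxD + 1).toNat) :
    (pvStepA maxD poly d).length = poly.length :=
  (pvStepA_foldl maxD poly d hd hlen _ le_rfl).1

theorem pvStepA_getD (maxD : Int) (poly : List Int) (d : Int) (hd : 0 < d)
    (hlen : poly.length = (maxD + 1).toNat) (j : ℕ) :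
    (pvStepA maxD poly d).getD j 0
      = poly.getD j 0 + (if d.toNat ≤ j ∧ (j : Int) ≤ maxD then poly.getD (j - d.toNat) 0 else 0) := by
  rw [pvStepA, ((pvStepA_foldl maxD poly d hd hlen _ le_rfl).2 j)]
  congr 1
  apply if_congr _ rfl rfl
  constructor
  · rintro ⟨h1, _, h3⟩; exact ⟨h1, h3⟩
  · rintro ⟨h1, h3⟩
    refine ⟨h1, ?_, h3⟩
    have : (j : Int) < maxD + 1 := by omega
    omega

theorem pvStepA_pvP (maxD : Int) (poly : List Int) (d : Int) (hd : 0 < d)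
    (hlen : poly.length = (maxD + 1).toNat)
    (hsupp : ∀ k : ℕ, maxD < (k : Int) + d → poly.getD k 0 = 0) :
    pvP (pvStepA maxD poly d) = pvP poly * (1 + Polynomial.X ^ d.toNat) := by
  apply Polynomial.ext
  intro j
  rw [pvP_coeff, pvCoeff_mul_binom, pvP_coeff, pvStepA_getD maxD poly d hd hlen j]
  congr 1
  by_cases h1 : d.toNat ≤ j
  · by_cases h2 : (j : Int) ≤ maxD
    · rw [if_pos ⟨h1, h2⟩, if_pos h1, pvP_coeff]
    · rw [if_neg (fun h => h2 h.2), if_pos h1, pvP_coeff]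
      symm
      apply hsupp
      omega
  · rw [if_neg (fun h => h1 h.1), if_neg h1]

-- A's outer loop over the remaining degrees
theorem pvMainA (maxD : Int) : ∀ (ds : List Int) (poly : List Int),
    (∀ d ∈ ds, 1 ≤ d) → poly.length = (maxD + 1).toNat →
    (∀ k : ℕ, maxD - ds.sum < (k : Int) → poly.getD k 0 = 0) →
    (ds.foldl (pvStepA maxD) poly).length = (maxD + 1).toNat ∧
    pvP (ds.foldl (pvStepA maxD) poly)
      = pvP poly * (ds.map (fun d => 1 + Polynomial.X ^ d.toNat)).prod := by
  intro ds
  induction ds with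
  | nil => intro poly _ hlen _; exact ⟨hlen, by simp⟩
  | cons d rest ih =>
    intro poly hall hlen hsupp
    have hd1 : 1 ≤ d := hall d (by simp)
    have hrest : ∀ x ∈ rest, 1 ≤ x := fun x hx => hall x (by simp [hx])
    have hrsum : 0 ≤ rest.sum := List.sum_nonneg (fun x hx => by have := hrest x hx; omega)
    have hsum : (d :: rest).sum = d + rest.sum := by simp
    have hstep_supp : ∀ k : ℕ, maxD < (k : Int) + d → poly.getD k 0 = 0 := by
      intro k hk
      apply hsupp
      rw [hsum]
      omega
    have hlen' : (pvStepA maxD poly d).length = (maxD + 1).toNat := by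
      rw [pvStepA_length maxD poly d (by omega) hlen, hlen]
    have hsupp' : ∀ k : ℕ, maxD - rest.sum < (k : Int) → (pvStepA maxD poly d).getD k 0 = 0 := by
      intro k hk
      rw [pvStepA_getD maxD poly d (by omega) hlen k]
      have hz : poly.getD k 0 = 0 := by
        apply hsupp; rw [hsum]; omega
      rw [hz]
      split_ifs with h
      · obtain ⟨h1, _⟩ := h
        have : poly.getD (k - d.toNat) 0 = 0 := by
          apply hsupp
          rw [hsum]
          omega
        rw [this]; ring
      · ring
    rw [List.foldl_cons]
    obtain ⟨l2, f2⟩ := ih (pvStepA maxD poly d) hrest hlen' hsupp'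
    refine ⟨l2, ?_⟩
    rw [f2, pvStepA_pvP maxD poly d (by omega) hlen hstep_supp]
    simp [mul_assoc]

theorem pvDegrees_ge (n : Int) : ∀ d ∈ (PySem.List.pyRange 1 n 1).map (fun i => 2 * i + 1), 1 ≤ d := by
  intro d hd
  obtain ⟨i, hi, rfl⟩ := List.mem_map.mp hd
  have := PySem.List.mem_pyRange_one.mp hi
  omega

-- B-side: the product tree computes the plain list product
theorem pvPairUp_prod : ∀ l : List Nat, (pvPairUp l).prod = l.prod := by
  intro l
  induction l using pvPairUp.induct with
  | case1 a b rest ih => simp [pvPairUp, ih, mul_assoc]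
  | case2 l h => rw [pvPairUp.eq_def]; split <;> simp_all

theorem pvPairUp_ne_nil : ∀ l : List Nat, l ≠ [] → pvPairUp l ≠ [] := by
  intro l hl
  rw [pvPairUp.eq_def]
  split <;> simp_all

theorem pvReduce_prod : ∀ (N : ℕ) (l : List Nat), l.length ≤ N → l ≠ [] → pvReduce l = l.prod := by
  intro N
  induction N with
  | zero => intro l h1 h2; cases l <;> simp_all
  | succ N ih =>
    intro l h1 h2
    rw [pvReduce]
    split
    · match l, h2 with
      | [x], _ => simp
    · rename_i h
      have hlt : (pvPairUp l).length < l.length := pvPairUp_length_lt l (by omega)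
      rw [ih (pvPairUp l) (by omega) (pvPairUp_ne_nil l h2), pvPairUp_prod]

-- coefficients of the product of the binomials are nonnegative and ≤ 2^(number of factors)
theorem pvProdCoeff_bound : ∀ (ds : List Int) (k : ℕ),
    0 ≤ ((ds.map (fun d : Int => (1 + Polynomial.X ^ d.toNat : Polynomial ℤ))).prod).coeff k ∧
    ((ds.map (fun d : Int => (1 + Polynomial.X ^ d.toNat : Polynomial ℤ))).prod).coeff k ≤ 2 ^ ds.length := by
  intro ds
  induction ds with
  | nil =>
    intro k
    simp only [List.map_nil, List.prod_nil, Polynomial.coeff_one, pow_zero, List.length_nil]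
    split <;> norm_num
  | cons d rest ih =>
    intro k
    simp only [List.map_cons, List.prod_cons, List.length_cons]
    rw [mul_comm, pvCoeff_mul_binom, pow_succ]
    obtain ⟨ih1, ih2⟩ := ih k
    obtain ⟨ih1', ih2'⟩ := ih (k - d.toNat)
    constructor
    · split_ifs <;> linarith
    · split_ifs <;> linarith

-- evaluation of the product of binomials
theorem pvProdEval (ds : List Int) (x : ℤ) :
    ((ds.map (fun d : Int => 1 + Polynomial.X ^ d.toNat)).prod).eval x
      = (ds.map (fun d : Int => 1 + x ^ d.toNat)).prod := by
  induction ds with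
  | nil => simp
  | cons d rest ih => simp [ih]

-- evaluation of a coefficient list polynomial
theorem pvP_eval (p : List Int) (x : ℤ) :
    (pvP p).eval x = ∑ i ∈ Finset.range p.length, p.getD i 0 * x ^ i := by
  unfold pvP
  rw [Polynomial.eval_finset_sum]
  simp

-- Horner value of a digit list
def pvHS (B : ℕ) : List ℕ → ℕ
  | [] => 0
  | x :: r => x + B * pvHS B r

theorem pvHS_cast (B : ℕ) : ∀ (a : List Int), (∀ x ∈ a, 0 ≤ x) →
    ((pvHS B (a.map Int.toNat) : ℕ) : ℤ)
      = ∑ i ∈ Finset.range a.length, a.getD i 0 * (B : ℤ) ^ i := by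
  intro a
  induction a with
  | nil => simp [pvHS]
  | cons x t ih =>
    intro hpos
    have hx : 0 ≤ x := hpos x (by simp)
    have iht := ih (fun y hy => hpos y (by simp [hy]))
    simp only [List.map_cons, pvHS, List.length_cons]
    have hcast : ((x.toNat + B * pvHS B (t.map Int.toNat) : ℕ) : ℤ)
        = x + (B : ℤ) * ((pvHS B (t.map Int.toNat) : ℕ) : ℤ) := by
      push_cast [Int.toNat_of_nonneg hx]
      ring
    rw [hcast, iht, Finset.sum_range_succ']
    simp only [List.getD_cons_succ, List.getD_cons_zero, pow_zero, mul_one]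
    conv_lhs => rw [Finset.mul_sum]
    rw [add_comm]
    congr 1
    apply Finset.sum_congr rfl
    intro i _
    ring

theorem pvHS_div (B : ℕ) (hB : 0 < B) : ∀ (c : List ℕ) (k : ℕ), (∀ x ∈ c, x < B) →
    pvHS B c / B ^ k = pvHS B (c.drop k) := by
  intro c
  induction c with
  | nil => intro k _; simp [pvHS]
  | cons x t ih =>
    intro k hlt
    cases k with
    | zero => simp
    | succ k =>
      have h1 := hlt x (by simp)
      have h2 : ∀ y ∈ t, y < B := fun y hy => hlt y (by simp [hy])
      have hdiv : pvHS B (x :: t) / B = pvHS B t := by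
        simp only [pvHS]
        rw [Nat.add_mul_div_left _ _ hB, Nat.div_eq_of_lt h1]
        omega
      rw [pow_succ', ← Nat.div_div_eq_div_mul, hdiv, ih k h2]
      simp

-- List.range sums as Finset sums
theorem pvSumRange (f : ℕ → ℕ) : ∀ n : ℕ, ((List.range n).map f).sum = ∑ i ∈ Finset.range n, f i := by
  intro n
  induction n with
  | zero => simp
  | succ n ih => rw [List.range_succ, Finset.sum_range_succ, List.map_append, List.sum_append, ih]; simp

-- reconstruction of a value < 256^m from its base-256 digits
theorem pvRecon : ∀ (m x : ℕ), x < 256 ^ m →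
    (∑ j ∈ Finset.range m, x / 256 ^ j % 256 * 256 ^ j) = x := by
  intro m
  induction m with
  | zero =>
    intro x hx
    interval_cases x
    simp
  | succ m ih =>
    intro x hx
    have hx' : x / 256 < 256 ^ m := by
      rw [Nat.div_lt_iff_lt_mul (by norm_num)]
      calc x < 256 ^ (m + 1) := hx
      _ = 256 ^ m * 256 := by rw [pow_succ]
    rw [Finset.sum_range_succ']
    have hstep : ∀ j : ℕ, x / 256 ^ (j + 1) % 256 * 256 ^ (j + 1)
        = 256 * (x / 256 / 256 ^ j % 256 * 256 ^ j) := by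
      intro j
      rw [pow_succ', ← Nat.div_div_eq_div_mul]
      ring
    calc (∑ j ∈ Finset.range m, x / 256 ^ (j + 1) % 256 * 256 ^ (j + 1)) + x / 256 ^ 0 % 256 * 256 ^ 0
        = (∑ j ∈ Finset.range m, 256 * (x / 256 / 256 ^ j % 256 * 256 ^ j)) + x % 256 := by
          rw [Finset.sum_congr rfl (fun j _ => hstep j)]; simp
    _ = 256 * (x / 256) + x % 256 := by rw [← Finset.mul_sum, ih (x / 256) hx']
    _ = x := by omega

-- getD into the byte list of the port
theorem pvRawGet (N P i : ℕ) (h : i < N) :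
    (((List.range N).map (fun i => P / 256 ^ i % 256)).getD i 0) = P / 256 ^ i % 256 := by
  rw [List.getD_eq_getElem?_getD, List.getElem?_map, List.getElem?_range h]
  rfl

-- decoding the packed integer slot by slot (byte slices) recovers the digit list
theorem pvDecode (bN nbN M : ℕ) (hbN8 : bN = 8 * nbN) (c : List ℕ) (hlen : c.length = M)
    (hlt : ∀ x ∈ c, x < 2 ^ bN) (k : ℕ) (hk : k < M) :
    (∑ j ∈ Finset.range nbN,
        ((List.range (nbN * M)).map (fun i => pvHS (2 ^ bN) c / 256 ^ i % 256)).getD (k * nbN + j) 0 * 256 ^ j)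
      = c.getD k 0 := by
  have h256 : (2:ℕ) ^ bN = 256 ^ nbN := by
    rw [hbN8, pow_mul]
    norm_num
  have hbpos : 0 < (2:ℕ) ^ bN := by positivity
  have hklen : k < c.length := by omega
  have hck := List.getD_eq_getElem c 0 hklen
  have hQ : pvHS (2 ^ bN) c / (2 ^ bN) ^ k
      = c.getD k 0 + 2 ^ bN * pvHS (2 ^ bN) (c.drop (k + 1)) := by
    rw [pvHS_div (2 ^ bN) hbpos c k hlt, List.drop_eq_getElem_cons hklen, hck]
    simp [pvHS]
  have hmemk : c.getD k 0 < 2 ^ bN := by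
    rw [hck]
    exact hlt _ (List.getElem_mem hklen)
  calc (∑ j ∈ Finset.range nbN,
        ((List.range (nbN * M)).map (fun i => pvHS (2 ^ bN) c / 256 ^ i % 256)).getD (k * nbN + j) 0 * 256 ^ j)
      = ∑ j ∈ Finset.range nbN, c.getD k 0 / 256 ^ j % 256 * 256 ^ j := by
        apply Finset.sum_congr rfl
        intro j hj
        have hjn : j < nbN := Finset.mem_range.mp hj
        have hidx : k * nbN + j < nbN * M := by
          have e1 : (k + 1) * nbN = k * nbN + nbN := by ring
          have e2 : (k + 1) * nbN ≤ M * nbN := Nat.mul_le_mul_right _ (by omega)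
          have e3 : M * nbN = nbN * M := by ring
          omega
        rw [pvRawGet (nbN * M) _ _ hidx]
        have hsplitIdx : (256:ℕ) ^ (k * nbN + j) = (2 ^ bN) ^ k * 256 ^ j := by
          rw [pow_add, h256, ← pow_mul, mul_comm nbN k]
        rw [hsplitIdx, ← Nat.div_div_eq_div_mul, hQ]
        have hsplit : (2:ℕ) ^ bN * pvHS (2 ^ bN) (c.drop (k + 1))
            = 256 ^ j * (256 * (256 ^ (nbN - j - 1) * pvHS (2 ^ bN) (c.drop (k + 1)))) := by
          generalize pvHS (2 ^ bN) (c.drop (k + 1)) = R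
          rw [h256]
          have hexp : nbN = j + 1 + (nbN - j - 1) := by omega
          calc (256:ℕ) ^ nbN * R
              = 256 ^ (j + 1 + (nbN - j - 1)) * R := by rw [← hexp]
          _ = 256 ^ j * (256 * (256 ^ (nbN - j - 1) * R)) := by
              rw [pow_add, pow_add, pow_one]
              ring
        rw [hsplit, Nat.add_mul_div_left _ _ (by positivity : 0 < (256:ℕ) ^ j),
          Nat.add_mul_mod_self_left]
  _ = c.getD k 0 := pvRecon nbN _ (by rw [← h256]; exact hmemk)

-- ===== VERDICT (by name: the statement is the Claim_ definition above) =====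
theorem ce_poincare_polynomial_sl_n_spec : Claim_equal_ce_poincare_polynomial_sl_n := by
  intro n _
  unfold Spec_ce_poincare_polynomial_sl_n
  simp only [ce_poincare_polynomial_sl_n, ce_poincare_polynomial_sl_n_alt]
  set degrees : List Int := (PySem.List.pyRange 1 n 1).map (fun i => 2 * i + 1) with hdeg
  have hall : ∀ d ∈ degrees, 1 ≤ d := pvDegrees_ge n
  set maxD : Int := degrees.sum with hmax
  have hmax0 : 0 ≤ maxD := List.sum_nonneg (fun x hx => by have := hall x hx; omega)
  -- slot geometry
  set nb : Int := PySem.Int.floordiv (max n 1 + 7) 8 with hnbdef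
  have hnbe : nb = (max n 1 + 7) / 8 := PySem.Int.floordiv_eq_ediv_of_pos (by norm_num)
  have hnb1 : 1 ≤ nb := by omega
  have hbn : max n 1 ≤ 8 * nb := by omega
  set nbN : ℕ := nb.toNat with hnbN
  set bN : ℕ := ((8 : Int) * nb).toNat with hbNdef
  have hbN8 : bN = 8 * nbN := by
    rw [hbNdef, hnbN]
    omega
  have hL : degrees.length = (n - 1).toNat := by
    rw [hdeg, List.length_map, PySem.List.length_pyRange_one]
  have hLlt : degrees.length < bN := by
    rw [hL, hbNdef]
    omega
  -- ===== A side =====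
  set poly0 : List Int := (List.replicate (maxD + 1).toNat 0).set 0 1 with hpoly0
  have hlen0 : poly0.length = (maxD + 1).toNat := by
    rw [hpoly0, List.length_set, List.length_replicate]
  have hget0 : ∀ j : ℕ, poly0.getD j 0 = if j = 0 then 1 else 0 := by
    intro j
    rw [hpoly0, List.getD_eq_getElem?_getD, List.getElem?_set]
    by_cases hj : j = 0
    · subst hj
      rw [if_pos rfl, if_pos (by simp; omega)]
      rfl
    · rw [if_neg (fun h => hj h.symm), if_neg hj]
      by_cases hjl : j < (maxD + 1).toNat
      · rw [List.getElem?_replicate]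
        simp [hjl]
      · rw [List.getElem?_eq_none (by simp; omega)]
        rfl
  have hP0 : pvP poly0 = 1 := by
    apply Polynomial.ext
    intro k
    rw [pvP_coeff, hget0, Polynomial.coeff_one]
  have hsupp0 : ∀ k : ℕ, maxD - degrees.sum < (k : Int) → poly0.getD k 0 = 0 := by
    intro k hk
    rw [hget0]
    have : k ≠ 0 := by omega
    simp [this]
  obtain ⟨hlenA, hPA⟩ := pvMainA maxD degrees poly0 hall hlen0 hsupp0
  rw [hP0, one_mul] at hPA
  set a : List Int := degrees.foldl (pvStepA maxD) poly0 with ha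
  -- coefficient bounds for a
  have hbound : ∀ k : ℕ, 0 ≤ a.getD k 0 ∧ a.getD k 0 ≤ 2 ^ degrees.length := by
    intro k
    rw [← pvP_coeff a k, hPA]
    exact pvProdCoeff_bound degrees k
  have hmem : ∀ y ∈ a, 0 ≤ y ∧ y ≤ 2 ^ degrees.length := by
    intro y hy
    obtain ⟨i, hi, hiv⟩ := List.mem_iff_getElem.mp hy
    have := hbound i
    rwa [List.getD_eq_getElem a 0 hi, hiv] at this
  set aN : List ℕ := a.map Int.toNat with haN
  have haNlen : aN.length = a.length := by rw [haN, List.length_map]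
  have h2L : (2 : ℕ) ^ degrees.length < 2 ^ bN := Nat.pow_lt_pow_right (by norm_num) hLlt
  have hlt : ∀ x ∈ aN, x < 2 ^ bN := by
    intro x hx
    obtain ⟨y, hy, rfl⟩ := List.mem_map.mp hx
    obtain ⟨hy0, hyb⟩ := hmem y hy
    have hyb' : y ≤ (((2:ℕ) ^ degrees.length : ℕ) : ℤ) := by exact_mod_cast hyb
    have : y.toNat ≤ (2:ℕ) ^ degrees.length := by omega
    omega
  -- ===== B side: the packed product =====
  set factors : List ℕ := degrees.map (fun d => 2 ^ ((8 : Int) * nb * d).toNat + 1) with hfac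
  have hProdTree : pvReduce (if factors = [] then [1] else factors) = factors.prod := by
    split
    · rename_i h
      rw [h, List.prod_nil, pvReduce]
      norm_num
    · rename_i h
      exact pvReduce_prod factors.length factors le_rfl h
  have htoNat : ∀ d ∈ degrees, ((8 : Int) * nb * d).toNat = bN * d.toNat := by
    intro d hd
    have hd1 := hall d hd
    have h1 : (8 : Int) * nb * d = ((bN : ℕ) : Int) * ((d.toNat : ℕ) : Int) := by
      rw [hbNdef, Int.toNat_of_nonneg (by omega : (0:Int) ≤ 8 * nb),
        Int.toNat_of_nonneg (by omega : (0:Int) ≤ d)]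
    rw [h1, ← Nat.cast_mul, Int.toNat_natCast]
  have hcastP : ((factors.prod : ℕ) : ℤ)
      = (degrees.map (fun d : Int => 1 + ((2:ℤ) ^ bN) ^ d.toNat)).prod := by
    rw [hfac, Nat.cast_list_prod, List.map_map]
    congr 1
    apply List.map_congr_left
    intro d hd
    simp only [Function.comp_apply]
    push_cast
    rw [htoNat d hd, pow_mul]
    ring
  have hpos' : ∀ x ∈ a, 0 ≤ x := fun x hx => (hmem x hx).1
  have hHS := pvHS_cast (2 ^ bN) a hpos'
  have hcast2 : (((2:ℕ) ^ bN : ℕ) : ℤ) = (2:ℤ) ^ bN := by push_cast; rfl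
  rw [hcast2] at hHS
  have heval : ((factors.prod : ℕ) : ℤ)
      = ∑ i ∈ Finset.range a.length, a.getD i 0 * ((2:ℤ) ^ bN) ^ i := by
    rw [hcastP, ← pvProdEval degrees ((2:ℤ) ^ bN), ← hPA, pvP_eval]
  have hPN : factors.prod = pvHS (2 ^ bN) aN := by
    have h := heval.trans hHS.symm
    exact_mod_cast h
  have hPval : pvReduce (if factors = [] then [1] else factors) = pvHS (2 ^ bN) aN :=
    hProdTree.trans hPN
  have hMN : ((nb * (maxD + 1)).toNat) = nbN * (maxD + 1).toNat := by
    have h1 : nb * (maxD + 1) = ((nbN : ℕ) : Int) * (((maxD + 1).toNat : ℕ) : Int) := by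
      rw [hnbN, Int.toNat_of_nonneg (by omega : (0:Int) ≤ nb),
        Int.toNat_of_nonneg (by omega : (0:Int) ≤ maxD + 1)]
    rw [h1, ← Nat.cast_mul, Int.toNat_natCast]
  simp only [hPval, hMN]
  apply List.ext_getElem
  · rw [hlenA, List.length_map, List.length_range]
  intro k h1 h2
  rw [List.getElem_map, List.getElem_range, pvSumRange]
  have hkM : k < (maxD + 1).toNat := by rw [hlenA] at h1; exact h1
  rw [pvDecode bN nbN ((maxD + 1).toNat) hbN8 aN (by rw [haNlen, hlenA]) hlt k hkM]
  have hklen : k < aN.length := by rw [haNlen]; exact h1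
  rw [List.getD_eq_getElem aN 0 hklen]
  simp only [haN, List.getElem_map]
  rw [Int.toNat_of_nonneg (hmem _ (List.getElem_mem h1)).1]
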